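-- pv_equiv track=rewrite | github.com/NGUYENTHAISON-2311/vcf_visualiser | src/VCFvisualiser.py | _get_location_type
-- ===== SOURCE A (Python) =====
-- from typing import List, Dict, Optional, Tuple
--
-- def _get_location_type(genes: List[Dict]) -> str:
--     """Get location type from genes"""
--     if not genes:
--         return 'intergenic'
--     types = [g['type'] for g in genes]
--     if 'CDS' in types:
--         return 'coding'
--     elif 'exon' in types:
--         return 'exon'
--     elif 'gene' in types:
--         return 'gene'
--     return 'genic'
-- ===== SOURCE B (Python) =====
-- def _get_location_type(genes):
--     """Get location type from genes (single priority-min pass)."""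
--     if not genes:
--         return 'intergenic'
--     rank = {'CDS': 0, 'exon': 1, 'gene': 2}
--     r = 3
--     for g in genes:
--         r = min(r, rank.get(g['type'], 3))
--     return ('coding', 'exon', 'gene', 'genic')[r]
-- ===== Notes on version B (the rewrite author's own statement) =====
-- stated objective: alternative
-- what changed: Replaces A's list build plus three sequential membership scans with a single pass tracking the minimum priority rank (CDS=0, exon=1, gene=2, other=3), mapped back to the label at the end.
import Mathlib
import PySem

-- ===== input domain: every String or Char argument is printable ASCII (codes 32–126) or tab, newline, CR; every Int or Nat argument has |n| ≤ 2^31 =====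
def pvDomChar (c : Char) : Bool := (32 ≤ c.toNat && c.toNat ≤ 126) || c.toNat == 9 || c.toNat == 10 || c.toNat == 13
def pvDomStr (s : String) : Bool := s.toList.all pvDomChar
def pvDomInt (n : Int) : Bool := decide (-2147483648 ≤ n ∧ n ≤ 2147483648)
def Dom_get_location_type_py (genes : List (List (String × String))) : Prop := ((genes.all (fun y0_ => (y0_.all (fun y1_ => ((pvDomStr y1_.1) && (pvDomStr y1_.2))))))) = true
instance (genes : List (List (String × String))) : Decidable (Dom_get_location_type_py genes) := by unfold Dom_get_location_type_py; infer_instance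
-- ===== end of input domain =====

-- B replaces A's three sequential membership scans with one priority-min pass; same result, same single-O(n) cost class.


-- ===== PORT A =====
-- g['type'] is a first-match lookup; a missing key (KeyError) is excluded by Pre_, so getD "" is exact there.
def get_location_type_py (genes : List (List (String × String))) : String :=
  if genes = [] then "intergenic"
  else
    let types := genes.map (fun g => (g.lookup "type").getD "")
    if "CDS" ∈ types then "coding"
    else if "exon" ∈ types then "exon"
    else if "gene" ∈ types then "gene"
    else "genic"

-- ===== PORT B =====
-- rank.get(t, 3) of Source B
def pvRankOf (t : String) : Nat :=
  if t = "CDS" then 0 else if t = "exon" then 1 else if t = "gene" then 2 else 3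

def get_location_type_py_alt (genes : List (List (String × String))) : String :=
  if genes = [] then "intergenic"
  else
    let r := genes.foldl (fun a g => min a (pvRankOf ((g.lookup "type").getD ""))) 3
    if r = 0 then "coding" else if r = 1 then "exon" else if r = 2 then "gene" else "genic"

-- ===== PRECONDITION & SPEC =====
-- Pre_ excludes exactly the inputs where the Python A raises KeyError: some gene dict without a 'type' key.
def Pre_get_location_type_py (genes : List (List (String × String))) : Prop :=
  (genes.all (fun g => (g.lookup "type").isSome)) = true
instance (genes : List (List (String × String))) : Decidable (Pre_get_location_type_py genes) := by unfold Pre_get_location_type_py; infer_instance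
def pvWitness_get_location_type_py : (List (List (String × String))) := [[("type", "CDS")], [("type", "exon")]]

def Spec_get_location_type_py (genes : List (List (String × String))) (out : String) : Prop := out = get_location_type_py_alt genes
instance (genes : List (List (String × String))) (out : String) : Decidable (Spec_get_location_type_py genes out) := by unfold Spec_get_location_type_py; infer_instance

-- ===== CLAIM (what is proved, stated in full; the proofs are below) =====
def Claim_equal_get_location_type_py : Prop := ∀ (genes : List (List (String × String))), Dom_get_location_type_py genes → Pre_get_location_type_py genes → Spec_get_location_type_py genes (get_location_type_py genes)

-- ===== LEMMAS AND PROOFS =====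
-- the min-fold over ranks equals the rank of A's if-chain on memberships
set_option maxHeartbeats 1000000 in
lemma pv_fold_char (ts : List String) (acc : Nat) (hacc : acc ≤ 3) :
    ts.foldl (fun a t => min a (pvRankOf t)) acc =
    min acc (if "CDS" ∈ ts then 0 else if "exon" ∈ ts then 1 else if "gene" ∈ ts then 2 else 3) := by
  induction ts generalizing acc with
  | nil => simpa using (Nat.min_eq_left hacc).symm
  | cons t ts ih =>
    rw [List.foldl_cons, ih _ (by simp only [pvRankOf]; split_ifs <;> omega)]
    simp only [List.mem_cons, pvRankOf, eq_comm (b := t)]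
    by_cases h1 : t = "CDS" <;> by_cases h2 : t = "exon" <;> by_cases h3 : t = "gene" <;>
      by_cases m1 : "CDS" ∈ ts <;> by_cases m2 : "exon" ∈ ts <;> by_cases m3 : "gene" ∈ ts <;>
        simp_all

-- ===== VERDICT (by name: the statement is the Claim_ definition above) =====
theorem get_location_type_py_spec : Claim_equal_get_location_type_py := by
  intro genes _ _
  unfold Spec_get_location_type_py get_location_type_py get_location_type_py_alt
  by_cases hne : genes = []
  · simp [hne]
  · simp only [hne]
    have : genes.foldl (fun a g => min a (pvRankOf ((g.lookup "type").getD ""))) 3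
        = (genes.map (fun g => (g.lookup "type").getD "")).foldl (fun a t => min a (pvRankOf t)) 3 := by
      rw [List.foldl_map]
    rw [this, pv_fold_char _ _ (by omega)]
    split_ifs <;> simp_all
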